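-- pv_equiv track=rewrite | github.com/idaholab/cape2stix | cape2stix/todb/rest_build.py | format_stix_to_db
-- ===== SOURCE A (Python) =====
-- from typing import List, Dict
--
-- def format_stix_to_db(stix_objs: List[Dict]) -> List[Dict]:
--     db_stix: List[Dict] = []
--     relations: List[Dict] = []
--
--     for obj in stix_objs:
--         if obj["type"] != "relationship":
--             db_stix.append(obj)
--         else:
--             relations.append(obj)
--
--     return db_stix + relations
-- ===== SOURCE B (Python) =====
-- from typing import List, Dict
--
-- def format_stix_to_db(stix_objs: List[Dict]) -> List[Dict]:
--     # Stable sort on the boolean key: non-relationships (False) first, in order,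
--     # then relationships (True), in order -- exactly db_stix + relations.
--     return sorted(stix_objs, key=lambda obj: obj["type"] == "relationship")
-- ===== Notes on version B (the rewrite author's own statement) =====
-- stated objective: idiomatic
-- what changed: Replaces the manual two-accumulator partition loop with a single stable sort keyed on the boolean predicate obj["type"] == "relationship".
import Mathlib
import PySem

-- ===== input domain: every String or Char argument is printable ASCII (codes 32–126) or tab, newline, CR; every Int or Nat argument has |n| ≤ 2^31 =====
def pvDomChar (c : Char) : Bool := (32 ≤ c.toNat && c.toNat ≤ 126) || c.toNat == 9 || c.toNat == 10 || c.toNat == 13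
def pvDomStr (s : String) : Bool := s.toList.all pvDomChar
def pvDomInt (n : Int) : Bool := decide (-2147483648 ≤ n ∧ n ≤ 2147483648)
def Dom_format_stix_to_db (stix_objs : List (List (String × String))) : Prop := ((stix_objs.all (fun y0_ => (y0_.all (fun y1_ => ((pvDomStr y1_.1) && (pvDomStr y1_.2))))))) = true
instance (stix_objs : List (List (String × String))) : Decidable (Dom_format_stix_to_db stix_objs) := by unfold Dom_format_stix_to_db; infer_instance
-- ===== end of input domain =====

-- B replaces A's two-accumulator partition loop with a single stable sort on the
-- boolean key obj["type"] == "relationship" (idiomatic; same return value).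


-- ===== PORT A =====
-- for obj in stix_objs: append to db_stix or relations; return db_stix + relations
def format_stix_to_db (stix_objs : List (List (String × String))) : List (List (String × String)) :=
  let p := stix_objs.foldl
    (fun (acc : List (List (String × String)) × List (List (String × String))) obj =>
      if (PySem.Dict.mk obj).get? "type" ≠ some "relationship" then (acc.1 ++ [obj], acc.2)
      else (acc.1, acc.2 ++ [obj]))
    ([], [])
  p.1 ++ p.2

-- ===== PORT B =====
-- sorted(stix_objs, key=lambda obj: obj["type"] == "relationship")
def format_stix_to_db_alt (stix_objs : List (List (String × String))) : List (List (String × String)) :=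
  PySem.List.sorted stix_objs (fun obj => (PySem.Dict.mk obj).get? "type" == some "relationship")

-- ===== PRECONDITION & SPEC =====
-- Pre_ excludes exactly the inputs on which Python A raises KeyError: an object with no "type" key.
def Pre_format_stix_to_db (stix_objs : List (List (String × String))) : Prop :=
  ∀ obj ∈ stix_objs, ((PySem.Dict.mk obj).get? "type").isSome = true
instance (stix_objs : List (List (String × String))) : Decidable (Pre_format_stix_to_db stix_objs) := by unfold Pre_format_stix_to_db; infer_instance
def pvWitness_format_stix_to_db : (List (List (String × String))) :=
  [[("type", "relationship")], [("type", "malware"), ("id", "m1")], [("type", "identity")]]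

def Spec_format_stix_to_db (stix_objs : List (List (String × String))) (out : List (List (String × String))) : Prop := out = format_stix_to_db_alt stix_objs
instance (stix_objs : List (List (String × String))) (out : List (List (String × String))) : Decidable (Spec_format_stix_to_db stix_objs out) := by unfold Spec_format_stix_to_db; infer_instance

-- ===== CLAIM (what is proved, stated in full; the proofs are below) =====
def Claim_equal_format_stix_to_db : Prop := ∀ (stix_objs : List (List (String × String))), Dom_format_stix_to_db stix_objs → Pre_format_stix_to_db stix_objs → Spec_format_stix_to_db stix_objs (format_stix_to_db stix_objs)

-- ===== LEMMAS AND PROOFS =====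

-- insertBy places x right between a prefix it is not `before` and a suffix it is `before`.
theorem insertBy_split {α : Type} (before : α → α → Bool) (x : α) :
    ∀ (fs ts : List α), (∀ y ∈ fs, before x y = false) → (∀ y ∈ ts, before x y = true) →
      PySem.List.insertBy before x (fs ++ ts) = fs ++ x :: ts := by
  intro fs
  induction fs with
  | nil =>
    intro ts _ hts
    cases ts with
    | nil => simp [PySem.List.insertBy]
    | cons t ts' => simp [PySem.List.insertBy, hts t (by simp)]
  | cons f fs' ih =>
    intro ts hfs hts
    simp [PySem.List.insertBy, hfs f (by simp),
      ih ts (fun y hy => hfs y (by simp [hy])) hts]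

-- The insertion-sort loop on a Bool key keeps the state partitioned: false-key
-- elements in order, then true-key elements in order.
theorem sorted_bool_loop {α : Type} (key : α → Bool) :
    ∀ (xs fs ts : List α), (∀ y ∈ fs, key y = false) → (∀ y ∈ ts, key y = true) →
      xs.foldl (fun acc x => PySem.List.insertBy (fun a b => decide (key a < key b)) x acc) (fs ++ ts)
      = (fs ++ xs.filter (fun x => !key x)) ++ (ts ++ xs.filter (fun x => key x)) := by
  intro xs
  induction xs with
  | nil => intro fs ts _ _; simp
  | cons x xs' ih =>
    intro fs ts hfs hts
    by_cases hx : key x = true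
    · have h1 : PySem.List.insertBy (fun a b => decide (key a < key b)) x (fs ++ ts)
          = (fs ++ ts) ++ [x] := by
        have := insertBy_split (fun a b => decide (key a < key b)) x (fs ++ ts) []
          (by intro y hy; rcases List.mem_append.1 hy with h | h
              · simp [hfs y h, hx, Bool.lt_iff]
              · simp [hts y h, hx])
          (by simp)
        simpa using this
      have h2 := ih fs (ts ++ [x]) hfs
        (by intro y hy; rcases List.mem_append.1 hy with h | h
            · exact hts y h
            · simp at h; simpa [h] using hx)
      simp only [List.foldl_cons, h1, List.append_assoc] at *
      rw [h2]
      simp [hx]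
    · have hx' : key x = false := by simpa using hx
      have h1 : PySem.List.insertBy (fun a b => decide (key a < key b)) x (fs ++ ts)
          = fs ++ x :: ts :=
        insertBy_split _ x fs ts
          (by intro y hy; simp [hx', hfs y hy])
          (by intro y hy; simp [hx', hts y hy, Bool.lt_iff])
      have h2 := ih (fs ++ [x]) ts
        (by intro y hy; rcases List.mem_append.1 hy with h | h
            · exact hfs y h
            · simp at h; simpa [h] using hx')
        hts
      simp only [List.foldl_cons, h1]
      have : fs ++ x :: ts = (fs ++ [x]) ++ ts := by simp
      rw [this, h2]
      simp [hx']

-- B is the stable partition: false keys first, then true keys.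
theorem alt_eq_partition (key : List (String × String) → Bool) (xs : List (List (String × String))) :
    PySem.List.sorted xs key = xs.filter (fun x => !key x) ++ xs.filter (fun x => key x) := by
  have := sorted_bool_loop key xs [] [] (by simp) (by simp)
  simpa [PySem.List.sorted] using this

-- A's loop produces the same two filtered blocks.
theorem a_loop (p : List (String × String) → Prop) [DecidablePred p] :
    ∀ (xs : List (List (String × String))) (db rel : List (List (String × String))),
      xs.foldl (fun acc obj => if p obj then (acc.1 ++ [obj], acc.2) else (acc.1, acc.2 ++ [obj])) (db, rel)
      = (db ++ xs.filter (fun x => decide (p x)), rel ++ xs.filter (fun x => !decide (p x))) := by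
  intro xs
  induction xs with
  | nil => intro db rel; simp
  | cons x xs' ih =>
    intro db rel
    by_cases hx : p x
    · simp [List.foldl_cons, hx, ih]
    · simp [List.foldl_cons, hx, ih]

-- ===== VERDICT (by name: the statement is the Claim_ definition above) =====
theorem format_stix_to_db_spec : Claim_equal_format_stix_to_db := by
  intro xs _ _
  show format_stix_to_db xs = format_stix_to_db_alt xs
  unfold format_stix_to_db format_stix_to_db_alt
  rw [alt_eq_partition]
  rw [a_loop (fun obj => (PySem.Dict.mk obj).get? "type" ≠ some "relationship") xs [] []]
  simp only [ne_eq, decide_not, List.nil_append]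
  congr 1 <;> (apply List.filter_congr; intro x _; rw [Bool.eq_iff_iff]; simp)
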